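-- pv_equiv track=rewrite | github.com/vharatian/GithubAPIWorkshop | AuthorMerge/GithubLogin.py | merge_based_on_login
-- ===== SOURCE A (Python) =====
-- def merge_based_on_login(user_data):
--     results = {}
--     for u in user_data:
--         login = u[2]
--         if login is not None:
--             if login in results:
--                 results[login]["name"].add(u[0])
--                 results[login]["email"].add(u[1])
--             else:
--                 results[login] = {"name": set([u[0]]), "email": set([u[1]])}
--
--     return results
-- ===== SOURCE B (Python) =====
-- def merge_based_on_login(user_data):
--     logins = list(dict.fromkeys(u[2] for u in user_data if u[2] is not None))
--     return {
--         login: {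
--             "name": set(u[0] for u in user_data if u[2] == login),
--             "email": set(u[1] for u in user_data if u[2] == login),
--         }
--         for login in logins
--     }
-- ===== Notes on version B (the rewrite author's own statement) =====
-- stated objective: alternative
-- what changed: Replaces A's single-pass dict-scatter (conditional in-place set mutation per row) with a two-phase grouping: first collect the distinct non-None logins in order of first occurrence, then build each login's name/email sets by filtering the whole list per login.
import Mathlib
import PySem

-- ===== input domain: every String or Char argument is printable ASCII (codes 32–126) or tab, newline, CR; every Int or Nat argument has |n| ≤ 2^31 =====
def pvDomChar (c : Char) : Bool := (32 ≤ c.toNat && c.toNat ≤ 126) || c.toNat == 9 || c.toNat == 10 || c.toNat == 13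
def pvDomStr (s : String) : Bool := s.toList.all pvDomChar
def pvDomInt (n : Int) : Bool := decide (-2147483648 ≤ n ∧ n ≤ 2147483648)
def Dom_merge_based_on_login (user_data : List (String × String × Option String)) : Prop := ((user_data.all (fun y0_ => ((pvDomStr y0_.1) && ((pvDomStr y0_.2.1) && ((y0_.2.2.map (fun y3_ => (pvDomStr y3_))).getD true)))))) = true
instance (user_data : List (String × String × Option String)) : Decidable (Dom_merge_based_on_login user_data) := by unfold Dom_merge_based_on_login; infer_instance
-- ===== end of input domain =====

-- B replaces A's single-pass dict-scatter with a two-phase grouping (distinct logins first,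
-- then per-login filtering); objective: alternative decomposition, same results.

-- ===== PORT A =====
-- the body of A's 'for u in user_data:' loop
def mblStep (d : PySem.Dict String (PySem.Dict String (PySem.Set String)))
    (u : String × String × Option String) :
    PySem.Dict String (PySem.Dict String (PySem.Set String)) :=
  match u.2.2 with
  | none => d
  | some login =>
    if d.contains login then
      -- results[login]["name"].add(u[0]); results[login]["email"].add(u[1])
      d.modify login PySem.Dict.empty (fun inner =>
        (inner.modify "name" PySem.Set.empty (fun s => PySem.Set.add s u.1)).modify
          "email" PySem.Set.empty (fun s => PySem.Set.add s u.2.1))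
    else
      d.insert login (PySem.Dict.ofList
        [("name", PySem.Set.ofList [u.1]), ("email", PySem.Set.ofList [u.2.1])])

def merge_based_on_login (user_data : List (String × String × Option String)) :
    List (String × List (String × List String)) :=
  ((user_data.foldl mblStep PySem.Dict.empty).items).map (fun p => (p.1, p.2.items))

-- ===== PORT B =====
def merge_based_on_login_alt (user_data : List (String × String × Option String)) :
    List (String × List (String × List String)) :=
  let logins := PySem.List.dedup (user_data.filterMap (fun u => u.2.2))
  logins.map (fun login =>
    (login,
      [("name", PySem.Set.ofList ((user_data.filter (fun u => u.2.2 == some login)).map (fun u => u.1))),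
       ("email", PySem.Set.ofList ((user_data.filter (fun u => u.2.2 == some login)).map (fun u => u.2.1)))]))

-- ===== PRECONDITION & SPEC =====
def Spec_merge_based_on_login (user_data : List (String × String × Option String)) (out : List (String × List (String × List String))) : Prop := out = merge_based_on_login_alt user_data
instance (user_data : List (String × String × Option String)) (out : List (String × List (String × List String))) : Decidable (Spec_merge_based_on_login user_data out) := by unfold Spec_merge_based_on_login; infer_instance

-- ===== CLAIM (what is proved, stated in full; the proofs are below) =====
def Claim_equal_merge_based_on_login : Prop := ∀ (user_data : List (String × String × Option String)), Dom_merge_based_on_login user_data → Spec_merge_based_on_login user_data (merge_based_on_login user_data)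

-- ===== LEMMAS AND PROOFS =====

-- the distinct logins of xs, in first-occurrence order
def mblLogins (xs : List (String × String × Option String)) : List String :=
  PySem.List.dedup (xs.filterMap (fun u => u.2.2))

def mblNames (l : String) (xs : List (String × String × Option String)) : PySem.Set String :=
  PySem.Set.ofList ((xs.filter (fun u => u.2.2 == some l)).map (fun u => u.1))

def mblEmails (l : String) (xs : List (String × String × Option String)) : PySem.Set String :=
  PySem.Set.ofList ((xs.filter (fun u => u.2.2 == some l)).map (fun u => u.2.1))

def mblInner (l : String) (xs : List (String × String × Option String)) :
    PySem.Dict String (PySem.Set String) :=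
  PySem.Dict.mk [("name", mblNames l xs), ("email", mblEmails l xs)]

-- the dict A's loop has built after consuming xs
def mblD (xs : List (String × String × Option String)) :
    PySem.Dict String (PySem.Dict String (PySem.Set String)) :=
  PySem.Dict.mk ((mblLogins xs).map (fun l => (l, mblInner l xs)))

theorem mbl_ofList_append (l : List String) (a : String) :
    PySem.Set.ofList (l ++ [a]) = PySem.Set.add (PySem.Set.ofList l) a := by
  simp [PySem.Set.ofList, List.foldl_append]

theorem mbl_logins_append (xs : List (String × String × Option String))
    (u : String × String × Option String) :
    mblLogins (xs ++ [u]) =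
      match u.2.2 with
      | none => mblLogins xs
      | some login => PySem.Set.add (mblLogins xs) login := by
  cases h : u.2.2 with
  | none => simp [mblLogins, List.filterMap_append, h]
  | some login =>
      simp [mblLogins, List.filterMap_append, h, PySem.List.dedup, mbl_ofList_append]

theorem mbl_names_append (l : String) (xs : List (String × String × Option String))
    (u : String × String × Option String) :
    mblNames l (xs ++ [u]) =
      if u.2.2 == some l then PySem.Set.add (mblNames l xs) u.1 else mblNames l xs := by
  by_cases h : u.2.2 = some l
  · simp [mblNames, List.filter_append, h, mbl_ofList_append]
  · simp [mblNames, List.filter_append, h]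

theorem mbl_emails_append (l : String) (xs : List (String × String × Option String))
    (u : String × String × Option String) :
    mblEmails l (xs ++ [u]) =
      if u.2.2 == some l then PySem.Set.add (mblEmails l xs) u.2.1 else mblEmails l xs := by
  by_cases h : u.2.2 = some l
  · simp [mblEmails, List.filter_append, h, mbl_ofList_append]
  · simp [mblEmails, List.filter_append, h]

theorem mbl_contains (xs : List (String × String × Option String)) (login : String) :
    (mblD xs).contains login = true ↔ login ∈ mblLogins xs := by
  simp [mblD, PySem.Dict.contains, List.any_map, List.any_eq_true, beq_iff_eq]

theorem mbl_filter_eq_nil (xs : List (String × String × Option String)) (login : String)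
    (h : login ∉ mblLogins xs) :
    xs.filter (fun u => u.2.2 == some login) = [] := by
  rw [List.filter_eq_nil_iff]
  intro u hu hbeq
  apply h
  rw [mblLogins, PySem.List.mem_dedup]
  exact List.mem_filterMap.mpr ⟨u, hu, by simpa using hbeq⟩

theorem mbl_main (xs : List (String × String × Option String)) :
    xs.foldl mblStep PySem.Dict.empty = mblD xs := by
  induction xs using List.reverseRecOn with
  | nil =>
      simp [mblD, mblLogins, PySem.List.dedup, PySem.Set.ofList, PySem.Dict.empty,
        PySem.Set.empty]
  | append_singleton xs u ih =>
      rw [List.foldl_append, List.foldl_cons, List.foldl_nil, ih]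
      cases hu : u.2.2 with
      | none =>
          simp only [mblStep, hu]
          have hl := mbl_logins_append xs u
          rw [hu] at hl
          apply PySem.Dict.ext
          simp only [mblD, hl]
          apply List.map_congr_left
          intro l _
          have hn := mbl_names_append l xs u
          have he := mbl_emails_append l xs u
          rw [hu] at hn he
          simp at hn he
          simp [mblInner, hn, he]
      | some login =>
          simp only [mblStep, hu]
          by_cases hmem : login ∈ mblLogins xs
          · rw [if_pos ((mbl_contains xs login).mpr hmem)]
            -- modify in place
            have hl := mbl_logins_append xs u
            rw [hu] at hl
            have hlog : mblLogins (xs ++ [u]) = mblLogins xs := by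
              rw [hl]; simp [PySem.Set.add, hmem]
            have hget : (mblD xs).getD login PySem.Dict.empty = mblInner login xs := by
              apply PySem.Dict.getD_of_mem_items
              · simp only [mblD]
                exact List.mem_map_of_mem hmem
              · have hk : (mblD xs).keys = mblLogins xs := by
                  simp only [mblD, PySem.Dict.keys, List.map_map]
                  rw [show ((fun x : String × PySem.Dict String (PySem.Set String) => x.1) ∘
                      fun l => (l, mblInner l xs)) = id from rfl, List.map_id]
                rw [hk]
                exact PySem.List.nodup_dedup (xs.filterMap (fun u => u.2.2))
            apply PySem.Dict.ext
            rw [PySem.Dict.modify, PySem.Dict.insert,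
              if_pos ((mbl_contains xs login).mpr hmem), hget]
            have hinner : ((mblInner login xs).modify "name" PySem.Set.empty
                  (fun s => PySem.Set.add s u.1)).modify "email" PySem.Set.empty
                  (fun s => PySem.Set.add s u.2.1) =
                PySem.Dict.mk [("name", PySem.Set.add (mblNames login xs) u.1),
                  ("email", PySem.Set.add (mblEmails login xs) u.2.1)] := by
              simp [mblInner, PySem.Dict.modify, PySem.Dict.insert, PySem.Dict.contains,
                PySem.Dict.getD, PySem.Dict.get?]
            rw [hinner]
            simp only [mblD, hlog, List.map_map]
            apply List.map_congr_left
            intro l _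
            have hn := mbl_names_append l xs u
            have he := mbl_emails_append l xs u
            rw [hu] at hn he
            by_cases hle : l = login
            · subst hle
              simp [Function.comp, mblInner, hn, he]
            · simp [Function.comp, mblInner, hn, he, hle, Ne.symm hle,
                beq_iff_eq]
          · rw [if_neg (by simp [mbl_contains, hmem])]
            have hl := mbl_logins_append xs u
            rw [hu] at hl
            have hlog : mblLogins (xs ++ [u]) = mblLogins xs ++ [login] := by
              rw [hl]; simp [PySem.Set.add, hmem]
            have hfil : xs.filter (fun v => v.2.2 == some login) = [] :=
              mbl_filter_eq_nil xs login hmem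
            apply PySem.Dict.ext
            rw [PySem.Dict.insert, if_neg (by simp [mbl_contains, hmem])]
            simp only [mblD, hlog, List.map_append, List.map_cons, List.map_nil]
            congr 1
            · apply List.map_congr_left
              intro l hlmem
              have hle : l ≠ login := fun h => hmem (h ▸ hlmem)
              have hn := mbl_names_append l xs u
              have he := mbl_emails_append l xs u
              rw [hu] at hn he
              simp [mblInner, hn, he, Ne.symm hle, beq_iff_eq]
            · have hn : mblNames login (xs ++ [u]) = PySem.Set.ofList [u.1] := by
                simp [mblNames, List.filter_append, hfil, hu, PySem.Set.ofList,
                  PySem.Set.add, PySem.Set.empty]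
              have he : mblEmails login (xs ++ [u]) = PySem.Set.ofList [u.2.1] := by
                simp [mblEmails, List.filter_append, hfil, hu, PySem.Set.ofList,
                  PySem.Set.add, PySem.Set.empty]
              simp [mblInner, hn, he, PySem.Dict.ofList, PySem.Dict.update, PySem.Dict.insert,
                PySem.Dict.empty, PySem.Dict.contains]

-- ===== VERDICT (by name: the statement is the Claim_ definition above) =====
theorem merge_based_on_login_spec : Claim_equal_merge_based_on_login := by
  intro user_data _
  unfold Spec_merge_based_on_login merge_based_on_login merge_based_on_login_alt
  rw [mbl_main]
  simp only [mblD, List.map_map]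
  apply List.map_congr_left
  intro l _
  simp [Function.comp, mblInner, mblNames, mblEmails]
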